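-- pv_equiv track=rewrite | github.com/kyowon1108/VisualComputing_Assignment | prune_legacy.py | find_reachable_files
-- ===== SOURCE A (Python) =====
-- from collections import defaultdict, deque
--
-- def find_reachable_files(entrypoints, graph):
--     """Find all files reachable from entrypoints using BFS"""
--     reachable = set()
--     queue = deque(entrypoints)
--
--     while queue:
--         current = queue.popleft()
--         if current in reachable:
--             continue
--
--         reachable.add(current)
--
--         # Add dependencies
--         for dep in graph.get(current, set()):
--             if dep not in reachable:
--                 queue.append(dep)
--
--     return reachable
-- ===== SOURCE B (Python) =====
-- def find_reachable_files(entrypoints, graph):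
--     """Find all files reachable from entrypoints using recursive DFS"""
--     reachable = set()
--
--     def visit(node):
--         if node in reachable:
--             return
--         reachable.add(node)
--         for dep in graph.get(node, set()):
--             visit(dep)
--
--     for entry in entrypoints:
--         visit(entry)
--     return reachable
-- ===== Notes on version B (the rewrite author's own statement) =====
-- stated objective: simpler
-- what changed: Replaces the explicit deque/worklist BFS (with its re-check of visited nodes at pop time) by a recursive depth-first traversal whose helper marks a node and recurses on its dependencies; the reachable set is identical.
import Mathlib
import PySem

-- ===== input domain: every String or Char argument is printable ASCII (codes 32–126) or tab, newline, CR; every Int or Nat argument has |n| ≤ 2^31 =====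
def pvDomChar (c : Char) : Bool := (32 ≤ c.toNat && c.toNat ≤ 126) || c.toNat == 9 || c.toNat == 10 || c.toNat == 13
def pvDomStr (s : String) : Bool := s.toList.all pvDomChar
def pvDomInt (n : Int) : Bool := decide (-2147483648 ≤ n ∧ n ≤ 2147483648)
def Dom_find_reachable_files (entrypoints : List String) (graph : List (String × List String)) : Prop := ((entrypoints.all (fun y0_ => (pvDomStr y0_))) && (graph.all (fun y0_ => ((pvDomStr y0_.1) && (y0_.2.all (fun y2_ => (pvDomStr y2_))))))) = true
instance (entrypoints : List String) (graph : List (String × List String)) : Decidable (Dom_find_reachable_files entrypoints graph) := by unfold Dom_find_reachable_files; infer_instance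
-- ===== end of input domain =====

-- B replaces the explicit deque/worklist BFS by a recursive depth-first traversal (simpler
-- decomposition); the reachable SET is identical.  The Python function returns an unordered
-- set, so both ports return its distinct elements as a sorted list (exact as a finite set).

-- shared helper: Python's `graph.get(x, set())` on the dict argument
def pvDeps (graph : List (String × List String)) (x : String) : List String :=
  PySem.Dict.getD (PySem.Dict.mk graph) x []

-- ===== PORT A =====
-- the `while queue:` loop, step for step (pop left; skip visited; mark; enqueue unvisited deps).
-- Fuel: each iteration pops one queue slot and at most the sum of all dep-list lengths slots are
-- ever enqueued beyond the initial entrypoints, so the fuel below is proven sufficient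
-- (lemma bfsLoop_main / bfs_char below); the 0-fuel branch is never reached.
def bfsLoop (graph : List (String × List String)) :
    Nat → PySem.Set String → List String → PySem.Set String
  | 0, reachable, _ => reachable
  | _ + 1, reachable, [] => reachable
  | fuel + 1, reachable, current :: queue =>
    if PySem.Set.contains reachable current then
      bfsLoop graph fuel reachable queue
    else
      let reachable' := PySem.Set.add reachable current
      bfsLoop graph fuel reachable'
        (queue ++ (pvDeps graph current).filter (fun dep => !PySem.Set.contains reachable' dep))

def find_reachable_files (entrypoints : List String) (graph : List (String × List String)) : List String :=
  PySem.List.sorted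
    (bfsLoop graph (entrypoints.length + (graph.map (fun p => p.2.length)).sum + 1)
      PySem.Set.empty entrypoints)
    (fun x => x)

-- ===== PORT B =====
-- every node the traversal can touch is an entrypoint or occurs in some dep list:
def pvUniv (entrypoints : List String) (graph : List (String × List String)) : PySem.Set String :=
  PySem.Set.ofList (entrypoints ++ (graph.map (fun p => p.2)).flatten)

-- visit(node): return if already reachable; mark; recurse on each dep.  Fuel = |pvUniv|+1 bounds
-- the recursion depth (each nested call has a strictly larger reachable set, all ⊆ pvUniv), so it
-- is proven sufficient (lemma dfsVisit_main / dfs_char below); the 0-fuel branch is never reached.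
def dfsVisit (graph : List (String × List String)) :
    Nat → PySem.Set String → String → PySem.Set String
  | 0, reachable, _ => reachable
  | fuel + 1, reachable, node =>
    if PySem.Set.contains reachable node then reachable
    else (pvDeps graph node).foldl (dfsVisit graph fuel) (PySem.Set.add reachable node)

def find_reachable_files_alt (entrypoints : List String) (graph : List (String × List String)) : List String :=
  PySem.List.sorted
    (entrypoints.foldl (dfsVisit graph ((pvUniv entrypoints graph).length + 1)) PySem.Set.empty)
    (fun x => x)

-- ===== PRECONDITION & SPEC =====
def Spec_find_reachable_files (entrypoints : List String) (graph : List (String × List String)) (out : List String) : Prop := out = find_reachable_files_alt entrypoints graph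
instance (entrypoints : List String) (graph : List (String × List String)) (out : List String) : Decidable (Spec_find_reachable_files entrypoints graph out) := by unfold Spec_find_reachable_files; infer_instance

-- ===== CLAIM (what is proved, stated in full; the proofs are below) =====
def Claim_equal_find_reachable_files : Prop := ∀ (entrypoints : List String) (graph : List (String × List String)), Dom_find_reachable_files entrypoints graph → Spec_find_reachable_files entrypoints graph (find_reachable_files entrypoints graph)

-- ===== LEMMAS AND PROOFS =====

-- the reflexive-transitive dependency closure of the entrypoints: what both traversals compute
inductive PvReach (entrypoints : List String) (graph : List (String × List String)) : String → Prop
  | base {x : String} : x ∈ entrypoints → PvReach entrypoints graph x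
  | step {x y : String} : PvReach entrypoints graph x → y ∈ pvDeps graph x →
      PvReach entrypoints graph y

theorem pvDeps_cons (k x : String) (v : List String) (g : List (String × List String)) :
    pvDeps ((k, v) :: g) x = if k == x then v else pvDeps g x := by
  simp [pvDeps, PySem.Dict.getD, PySem.Dict.get?_mk_cons]; split <;> simp

theorem pvDeps_nil (x : String) : pvDeps [] x = [] := rfl

theorem pvDeps_subset_flatten (g : List (String × List String)) (x : String) :
    ∀ d ∈ pvDeps g x, d ∈ (g.map (fun p => p.2)).flatten := by
  induction g with
  | nil => simp [pvDeps_nil]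
  | cons p g ih =>
    obtain ⟨k, v⟩ := p
    intro d hd
    rw [pvDeps_cons] at hd
    by_cases hk : k == x
    · simp only [hk, if_true] at hd
      simp [hd]
    · simp only [hk] at hd
      simp only [List.map_cons, List.flatten_cons, List.mem_append]
      exact Or.inr (ih d hd)

-- fuel potential of the BFS loop: total length of the dep lists of the not-yet-reached keys
def pvS (g : List (String × List String)) (reach : List String) : Nat :=
  (g.map (fun p => if p.1 ∈ reach then 0 else p.2.length)).sum

theorem pvS_anti (g : List (String × List String)) {r1 r2 : List String}
    (h : ∀ x ∈ r1, x ∈ r2) : pvS g r2 ≤ pvS g r1 := by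
  induction g with
  | nil => simp [pvS]
  | cons p g ih =>
    simp only [pvS, List.map_cons, List.sum_cons] at *
    have : (if p.1 ∈ r2 then 0 else p.2.length) ≤ (if p.1 ∈ r1 then 0 else p.2.length) := by
      by_cases h1 : p.1 ∈ r1
      · simp [h1, h p.1 h1]
      · simp [h1]; split <;> omega
    omega

theorem pvS_add (g : List (String × List String)) (c : String) (reach : List String)
    (hc : c ∉ reach) : pvS g (reach ++ [c]) + (pvDeps g c).length ≤ pvS g reach := by
  induction g with
  | nil => simp [pvS, pvDeps_nil]
  | cons p g ih =>
    obtain ⟨k, v⟩ := p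
    rw [pvDeps_cons]
    by_cases hk : k = c
    · subst hk
      simp only [pvS, List.map_cons, List.sum_cons, List.mem_append, List.mem_singleton] at *
      have h1 : pvS g (reach ++ [k]) ≤ pvS g reach :=
        pvS_anti g (fun x hx => by simp [hx])
      simp only [pvS] at h1
      simp [hc]
      omega
    · have hbeq : (k == c) = false := by simp [hk]
      have hmem : (k ∈ reach ++ [c]) ↔ k ∈ reach := by simp [hk]
      simp only [pvS, List.map_cons, List.sum_cons, hbeq, Bool.false_eq_true, if_false] at *
      rw [if_congr hmem rfl rfl]
      omega

theorem contains_false_not_mem {s : PySem.Set String} {x : String}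
    (h : PySem.Set.contains s x = false) : x ∉ s := by
  intro hm
  rw [(PySem.Set.contains_iff s x).mpr hm] at h
  exact absurd h (by simp)

-- the BFS worklist invariant: with enough fuel the loop returns a nodup superset of reach and
-- queue, all reachable, closed under pvDeps
theorem bfsLoop_main (entry : List String) (g : List (String × List String)) (fuel : Nat) :
    ∀ (reach : PySem.Set String) (queue : List String),
      reach.Nodup →
      queue.length + pvS g reach ≤ fuel →
      (∀ x ∈ reach, PvReach entry g x) →
      (∀ x ∈ queue, PvReach entry g x) →
      (∀ x ∈ reach, ∀ d ∈ pvDeps g x, d ∈ reach ∨ d ∈ queue) →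
      (bfsLoop g fuel reach queue).Nodup ∧
      (∀ x ∈ bfsLoop g fuel reach queue, PvReach entry g x) ∧
      (∀ x ∈ reach, x ∈ bfsLoop g fuel reach queue) ∧
      (∀ x ∈ queue, x ∈ bfsLoop g fuel reach queue) ∧
      (∀ x ∈ bfsLoop g fuel reach queue, ∀ d ∈ pvDeps g x, d ∈ bfsLoop g fuel reach queue) := by
  induction fuel with
  | zero =>
    intro reach queue hnd hfuel hr hq hcl
    have hq0 : queue = [] := List.eq_nil_of_length_eq_zero (by omega)
    subst hq0
    simp only [bfsLoop]
    exact ⟨hnd, hr, fun x hx => hx, by simp, fun x hx d hd => (hcl x hx d hd).elim id (by simp)⟩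
  | succ fuel ih =>
    intro reach queue hnd hfuel hr hq hcl
    match queue with
    | [] =>
      simp only [bfsLoop]
      exact ⟨hnd, hr, fun x hx => hx, by simp, fun x hx d hd => (hcl x hx d hd).elim id (by simp)⟩
    | c :: rest =>
      cases hco : PySem.Set.contains reach c with
      | true =>
        have hcm : c ∈ reach := (PySem.Set.contains_iff reach c).mp hco
        have heq : bfsLoop g (fuel + 1) reach (c :: rest) = bfsLoop g fuel reach rest := by
          simp only [bfsLoop, hco, if_true]
        rw [heq]
        have hcl' : ∀ x ∈ reach, ∀ d ∈ pvDeps g x, d ∈ reach ∨ d ∈ rest := by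
          intro x hx d hd
          rcases hcl x hx d hd with h | h
          · exact Or.inl h
          · rcases List.mem_cons.mp h with h | h
            · exact Or.inl (h ▸ hcm)
            · exact Or.inr h
        obtain ⟨c1, c2, c3, c4, c5⟩ := ih reach rest hnd (by simp at hfuel ⊢; omega) hr
          (fun x hx => hq x (List.mem_cons_of_mem _ hx)) hcl'
        refine ⟨c1, c2, c3, ?_, c5⟩
        intro x hx
        rcases List.mem_cons.mp hx with h | h
        · exact c3 x (h ▸ hcm)
        · exact c4 x h
      | false =>
        have hcm : c ∉ reach := contains_false_not_mem hco
        have hadd : PySem.Set.add reach c = reach ++ [c] := by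
          simp [PySem.Set.add, hcm]
        set R' : PySem.Set String := reach ++ [c] with hR'
        set q' : List String :=
          rest ++ (pvDeps g c).filter (fun dep => !PySem.Set.contains R' dep) with hq'
        have heq : bfsLoop g (fuel + 1) reach (c :: rest) = bfsLoop g fuel R' q' := by
          simp only [bfsLoop, hco, Bool.false_eq_true, if_false]
          rw [hadd]
        rw [heq]
        have hfil : ∀ d, d ∈ (pvDeps g c).filter (fun dep => !PySem.Set.contains R' dep) ↔
            d ∈ pvDeps g c ∧ d ∉ R' := by
          intro d
          simp only [List.mem_filter, Bool.not_eq_eq_eq_not, Bool.not_true]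
          constructor
          · rintro ⟨h1, h2⟩; exact ⟨h1, contains_false_not_mem h2⟩
          · rintro ⟨h1, h2⟩
            refine ⟨h1, ?_⟩
            cases hc2 : PySem.Set.contains R' d with
            | false => rfl
            | true => exact absurd ((PySem.Set.contains_iff R' d).mp hc2) h2
        have hndR' : R'.Nodup := by
          rw [hR']
          simp only [List.nodup_append, List.nodup_cons, List.not_mem_nil, not_false_iff,
            List.nodup_nil, and_true, true_and]
          refine ⟨hnd, ?_⟩
          intro a ha b hb
          rw [List.mem_singleton] at hb
          subst hb
          exact fun h => hcm (h ▸ ha)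
        have hfuel' : q'.length + pvS g R' ≤ fuel := by
          have h1 : q'.length ≤ rest.length + (pvDeps g c).length := by
            rw [hq']
            have := List.length_filter_le (fun dep => !PySem.Set.contains R' dep) (pvDeps g c)
            simp only [List.length_append]
            omega
          have h2 : pvS g R' + (pvDeps g c).length ≤ pvS g reach := pvS_add g c reach hcm
          simp only [List.length_cons] at hfuel
          omega
        have hrR' : ∀ x ∈ R', PvReach entry g x := by
          intro x hx
          rcases List.mem_append.mp hx with h | h
          · exact hr x h
          · exact (List.mem_singleton.mp h) ▸ hq c List.mem_cons_self
        have hqq' : ∀ x ∈ q', PvReach entry g x := by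
          intro x hx
          rcases List.mem_append.mp hx with h | h
          · exact hq x (List.mem_cons_of_mem _ h)
          · exact PvReach.step (hq c List.mem_cons_self) ((hfil x).mp h).1
        have hclR' : ∀ x ∈ R', ∀ d ∈ pvDeps g x, d ∈ R' ∨ d ∈ q' := by
          intro x hx d hd
          rcases List.mem_append.mp hx with h | h
          · rcases hcl x h d hd with h1 | h1
            · exact Or.inl (List.mem_append.mpr (Or.inl h1))
            · rcases List.mem_cons.mp h1 with h2 | h2
              · exact Or.inl (by rw [hR']; simp [h2])
              · exact Or.inr (List.mem_append.mpr (Or.inl h2))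
          · have hx' : x = c := List.mem_singleton.mp h
            subst hx'
            by_cases hdR : d ∈ R'
            · exact Or.inl hdR
            · exact Or.inr (List.mem_append.mpr (Or.inr ((hfil d).mpr ⟨hd, hdR⟩)))
        obtain ⟨c1, c2, c3, c4, c5⟩ := ih R' q' hndR' hfuel' hrR' hqq' hclR'
        refine ⟨c1, c2, fun x hx => c3 x (by simp [hR', hx]), ?_, c5⟩
        intro x hx
        rcases List.mem_cons.mp hx with h | h
        · exact c3 x (by simp [hR', h])
        · exact c4 x (List.mem_append.mpr (Or.inl h))

-- the BFS result is exactly the closure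
theorem bfs_char (entry : List String) (g : List (String × List String)) :
    (bfsLoop g (entry.length + (g.map (fun p => p.2.length)).sum + 1)
      PySem.Set.empty entry).Nodup ∧
    (∀ x, x ∈ bfsLoop g (entry.length + (g.map (fun p => p.2.length)).sum + 1)
      PySem.Set.empty entry ↔ PvReach entry g x) := by
  have hS : pvS g [] = (g.map (fun p => p.2.length)).sum := by
    simp [pvS]
  have hempty : (PySem.Set.empty : PySem.Set String) = [] := rfl
  obtain ⟨c1, c2, _, c4, c5⟩ :=
    bfsLoop_main entry g (entry.length + (g.map (fun p => p.2.length)).sum + 1)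
      PySem.Set.empty entry (by rw [hempty]; exact List.nodup_nil)
      (by rw [hempty, hS]; omega)
      (by rw [hempty]; simp)
      (fun x hx => PvReach.base hx)
      (by rw [hempty]; simp)
  refine ⟨c1, fun x => ⟨c2 x, ?_⟩⟩
  intro hreach
  induction hreach with
  | base h => exact c4 _ h
  | step _ hd ihm => exact c5 _ ihm _ hd

theorem mem_pvUniv_of_entry (entry : List String) (g : List (String × List String))
    {x : String} (hx : x ∈ entry) : x ∈ pvUniv entry g := by
  rw [pvUniv, PySem.Set.mem_ofList]
  exact List.mem_append.mpr (Or.inl hx)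

theorem mem_pvUniv_of_dep (entry : List String) (g : List (String × List String))
    {x d : String} (hd : d ∈ pvDeps g x) : d ∈ pvUniv entry g := by
  rw [pvUniv, PySem.Set.mem_ofList]
  exact List.mem_append.mpr (Or.inr (pvDeps_subset_flatten g x d hd))

-- the DFS recursion invariant: with fuel ≥ |pvUniv|+1-|reach| the visit returns a nodup superset
-- of reach containing node, inside pvUniv and reachable, and every NEW node is fully expanded
theorem dfsVisit_main (entry : List String) (g : List (String × List String)) (fuel : Nat) :
    ∀ (reach : PySem.Set String) (node : String),
      reach.Nodup →
      (∀ x ∈ reach, x ∈ pvUniv entry g) →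
      node ∈ pvUniv entry g →
      (pvUniv entry g).length + 1 ≤ fuel + reach.length →
      PvReach entry g node →
      (∀ x ∈ reach, PvReach entry g x) →
      (dfsVisit g fuel reach node).Nodup ∧
      (∀ x ∈ reach, x ∈ dfsVisit g fuel reach node) ∧
      node ∈ dfsVisit g fuel reach node ∧
      (∀ x ∈ dfsVisit g fuel reach node, x ∈ pvUniv entry g) ∧
      (∀ x ∈ dfsVisit g fuel reach node, PvReach entry g x) ∧
      (∀ x ∈ dfsVisit g fuel reach node, x ∉ reach → ∀ d ∈ pvDeps g x,
        d ∈ dfsVisit g fuel reach node) := by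
  induction fuel with
  | zero =>
    intro reach node hnd hrU hnU hfuel _ _
    have hle : reach.length ≤ (pvUniv entry g).length :=
      (List.subperm_of_subset hnd (fun x hx => hrU x hx)).length_le
    omega
  | succ fuel ih =>
    intro reach node hnd hrU hnU hfuel hrch hrall
    cases hco : PySem.Set.contains reach node with
    | true =>
      have hm : node ∈ reach := (PySem.Set.contains_iff reach node).mp hco
      have heq : dfsVisit g (fuel + 1) reach node = reach := by simp only [dfsVisit, hco, if_true]
      rw [heq]
      exact ⟨hnd, fun x hx => hx, hm, hrU, hrall, fun x hx hnx => absurd hx hnx⟩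
    | false =>
      have hm : node ∉ reach := contains_false_not_mem hco
      have hadd : PySem.Set.add reach node = reach ++ [node] := by simp [PySem.Set.add, hm]
      have heq : dfsVisit g (fuel + 1) reach node =
          (pvDeps g node).foldl (dfsVisit g fuel) (reach ++ [node]) := by
        simp only [dfsVisit, hco, Bool.false_eq_true, if_false]
        rw [hadd]
      rw [heq]
      -- inner fold over the dep list
      have hfold : ∀ (l : List String), (∀ d ∈ l, d ∈ pvUniv entry g ∧ PvReach entry g d) →
          ∀ (acc : PySem.Set String),
            acc.Nodup → (∀ x ∈ acc, x ∈ pvUniv entry g) → (∀ x ∈ acc, PvReach entry g x) →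
            (∀ x ∈ reach ++ [node], x ∈ acc) → reach.length + 1 ≤ acc.length →
            (∀ x ∈ acc, x ∉ reach ++ [node] → ∀ d ∈ pvDeps g x, d ∈ acc) →
            (l.foldl (dfsVisit g fuel) acc).Nodup ∧
            (∀ x ∈ l.foldl (dfsVisit g fuel) acc, x ∈ pvUniv entry g) ∧
            (∀ x ∈ l.foldl (dfsVisit g fuel) acc, PvReach entry g x) ∧
            (∀ x ∈ reach ++ [node], x ∈ l.foldl (dfsVisit g fuel) acc) ∧
            reach.length + 1 ≤ (l.foldl (dfsVisit g fuel) acc).length ∧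
            (∀ x ∈ l.foldl (dfsVisit g fuel) acc, x ∉ reach ++ [node] →
              ∀ d ∈ pvDeps g x, d ∈ l.foldl (dfsVisit g fuel) acc) ∧
            (∀ x ∈ acc, x ∈ l.foldl (dfsVisit g fuel) acc) ∧
            (∀ d ∈ l, d ∈ l.foldl (dfsVisit g fuel) acc) := by
        intro l
        induction l with
        | nil =>
          intro _ acc a1 a2 a3 a4 a5 a6
          simp only [List.foldl_nil]
          exact ⟨a1, a2, a3, a4, a5, a6, fun x hx => hx, by simp⟩
        | cons d l ihl =>
          intro hl acc a1 a2 a3 a4 a5 a6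
          obtain ⟨hdU, hdR⟩ := hl d List.mem_cons_self
          obtain ⟨b1, b2, b3, b4, b5, b6⟩ :=
            ih acc d a1 a2 hdU (by omega) hdR a3
          set acc' := dfsVisit g fuel acc d with hacc'
          have hlen' : acc.length ≤ acc'.length :=
            (List.subperm_of_subset a1 (fun x hx => b2 x hx)).length_le
          have a6' : ∀ x ∈ acc', x ∉ reach ++ [node] → ∀ e ∈ pvDeps g x, e ∈ acc' := by
            intro x hx hnx e he
            by_cases hxa : x ∈ acc
            · exact b2 _ (a6 x hxa hnx e he)
            · exact b6 x hx hxa e he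
          obtain ⟨d1, d2, d3, d4, d5, d6, d7, d8⟩ :=
            ihl (fun e he => hl e (List.mem_cons_of_mem _ he)) acc' b1 b4 b5
              (fun x hx => b2 x (a4 x hx)) (by omega) a6'
          simp only [List.foldl_cons]
          refine ⟨d1, d2, d3, d4, d5, d6, fun x hx => d7 x (b2 x hx), ?_⟩
          intro e he
          rcases List.mem_cons.mp he with h | h
          · subst h; exact d7 _ b3
          · exact d8 e h
      have hdepsOK : ∀ d ∈ pvDeps g node, d ∈ pvUniv entry g ∧ PvReach entry g d :=
        fun d hd => ⟨mem_pvUniv_of_dep entry g hd, PvReach.step hrch hd⟩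
      have hnd0 : (reach ++ [node]).Nodup := by
        simp only [List.nodup_append, List.nodup_cons, List.not_mem_nil, not_false_iff,
          List.nodup_nil, and_true, true_and]
        refine ⟨hnd, ?_⟩
        intro a ha b hb
        rw [List.mem_singleton] at hb
        subst hb
        exact fun h => hm (h ▸ ha)
      obtain ⟨f1, f2, f3, f4, f5, f6, _, f8⟩ :=
        hfold (pvDeps g node) hdepsOK (reach ++ [node]) hnd0
          (by intro x hx
              rcases List.mem_append.mp hx with h | h
              · exact hrU x h
              · exact (List.mem_singleton.mp h) ▸ hnU)
          (by intro x hx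
              rcases List.mem_append.mp hx with h | h
              · exact hrall x h
              · exact (List.mem_singleton.mp h) ▸ hrch)
          (fun x hx => hx) (by simp) (fun x hx hnx => absurd hx hnx)
      refine ⟨f1, fun x hx => f4 x (List.mem_append.mpr (Or.inl hx)),
        f4 node (by simp), f2, f3, ?_⟩
      intro x hx hnx d hd
      by_cases hxn : x = node
      · exact f8 d (hxn ▸ hd)
      · exact f6 x hx (by simp [hnx, hxn]) d hd

-- the DFS result is exactly the closure
theorem dfs_char (entry : List String) (g : List (String × List String)) :
    (entry.foldl (dfsVisit g ((pvUniv entry g).length + 1)) PySem.Set.empty).Nodup ∧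
    (∀ x, x ∈ entry.foldl (dfsVisit g ((pvUniv entry g).length + 1)) PySem.Set.empty ↔
      PvReach entry g x) := by
  have houter : ∀ (l : List String), (∀ e ∈ l, e ∈ entry) →
      ∀ (acc : PySem.Set String),
        acc.Nodup → (∀ x ∈ acc, x ∈ pvUniv entry g) → (∀ x ∈ acc, PvReach entry g x) →
        (∀ x ∈ acc, ∀ d ∈ pvDeps g x, d ∈ acc) →
        (l.foldl (dfsVisit g ((pvUniv entry g).length + 1)) acc).Nodup ∧
        (∀ x ∈ l.foldl (dfsVisit g ((pvUniv entry g).length + 1)) acc, x ∈ pvUniv entry g) ∧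
        (∀ x ∈ l.foldl (dfsVisit g ((pvUniv entry g).length + 1)) acc, PvReach entry g x) ∧
        (∀ x ∈ l.foldl (dfsVisit g ((pvUniv entry g).length + 1)) acc, ∀ d ∈ pvDeps g x,
          d ∈ l.foldl (dfsVisit g ((pvUniv entry g).length + 1)) acc) ∧
        (∀ x ∈ acc, x ∈ l.foldl (dfsVisit g ((pvUniv entry g).length + 1)) acc) ∧
        (∀ e ∈ l, e ∈ l.foldl (dfsVisit g ((pvUniv entry g).length + 1)) acc) := by
    intro l
    induction l with
    | nil =>
      intro _ acc a1 a2 a3 a4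
      simp only [List.foldl_nil]
      exact ⟨a1, a2, a3, a4, fun x hx => hx, by simp⟩
    | cons e l ihl =>
      intro hl acc a1 a2 a3 a4
      have heE : e ∈ entry := hl e List.mem_cons_self
      obtain ⟨b1, b2, b3, b4, b5, b6⟩ :=
        dfsVisit_main entry g ((pvUniv entry g).length + 1) acc e a1 a2
          (mem_pvUniv_of_entry entry g heE) (by omega) (PvReach.base heE) a3
      set acc' := dfsVisit g ((pvUniv entry g).length + 1) acc e with hacc'
      have a4' : ∀ x ∈ acc', ∀ d ∈ pvDeps g x, d ∈ acc' := by
        intro x hx d hd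
        by_cases hxa : x ∈ acc
        · exact b2 _ (a4 x hxa d hd)
        · exact b6 x hx hxa d hd
      obtain ⟨d1, d2, d3, d4, d5, d6⟩ :=
        ihl (fun e' he' => hl e' (List.mem_cons_of_mem _ he')) acc' b1 b4 b5 a4'
      simp only [List.foldl_cons]
      refine ⟨d1, d2, d3, d4, fun x hx => d5 x (b2 x hx), ?_⟩
      intro e' he'
      rcases List.mem_cons.mp he' with h | h
      · subst h; exact d5 _ b3
      · exact d6 e' h
  have hempty : (PySem.Set.empty : PySem.Set String) = [] := rfl
  obtain ⟨c1, c2, c3, c4, _, c6⟩ :=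
    houter entry (fun e he => he) PySem.Set.empty
      (by rw [hempty]; exact List.nodup_nil) (by rw [hempty]; simp)
      (by rw [hempty]; simp) (by rw [hempty]; simp)
  refine ⟨c1, fun x => ⟨c3 x, ?_⟩⟩
  intro hreach
  induction hreach with
  | base h => exact c6 _ h
  | step _ hd ihm => exact c4 _ ihm _ hd

-- ===== VERDICT (by name: the statement is the Claim_ definition above) =====
theorem find_reachable_files_spec : Claim_equal_find_reachable_files := by
  intro entry g _hdom
  unfold Spec_find_reachable_files find_reachable_files find_reachable_files_alt
  obtain ⟨hndA, hmemA⟩ := bfs_char entry g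
  obtain ⟨hndB, hmemB⟩ := dfs_char entry g
  have hperm :
      (bfsLoop g (entry.length + (g.map (fun p => p.2.length)).sum + 1)
        PySem.Set.empty entry).Perm
      (entry.foldl (dfsVisit g ((pvUniv entry g).length + 1)) PySem.Set.empty) :=
    (List.perm_ext_iff_of_nodup hndA hndB).mpr
      (fun a => (hmemA a).trans (hmemB a).symm)
  exact PySem.List.sorted_eq_sorted_of_perm _ _ (fun x => x) (fun _ _ h => h) hperm
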